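-- pv_equiv track=rewrite | github.com/EleqtronBree/PythonAssignments | Programming Lecture Exercises.py | get_divisor_string
-- ===== SOURCE A (Python) =====
-- def get_divisor_string(number):
-- 	divisor = 1
-- 	div_string = ""
-- 	while divisor <= number // 2:
-- 		if number % divisor == 0:
-- 			div_string += str(divisor) + " "
-- 		divisor += 1
--
-- 	div_string += str(number)
-- 	return div_string
-- ===== SOURCE B (Python) =====
-- def get_divisor_string(number):
--     divs = []
--     i = 1
--     while i * i <= number:
--         if number % i == 0:
--             divs.append(i)
--             if i != number // i:
--                 divs.append(number // i)
--         i += 1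
--     divs.sort()
--     parts = [str(d) for d in divs if d != number]
--     parts.append(str(number))
--     return " ".join(parts)
-- ===== Notes on version B (the rewrite author's own statement) =====
-- stated objective: faster
-- what changed: B enumerates divisor pairs only up to the square root of the number, sorts them and joins, instead of A's trial division of every candidate up to half the number with incremental string concatenation.
import Mathlib
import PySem

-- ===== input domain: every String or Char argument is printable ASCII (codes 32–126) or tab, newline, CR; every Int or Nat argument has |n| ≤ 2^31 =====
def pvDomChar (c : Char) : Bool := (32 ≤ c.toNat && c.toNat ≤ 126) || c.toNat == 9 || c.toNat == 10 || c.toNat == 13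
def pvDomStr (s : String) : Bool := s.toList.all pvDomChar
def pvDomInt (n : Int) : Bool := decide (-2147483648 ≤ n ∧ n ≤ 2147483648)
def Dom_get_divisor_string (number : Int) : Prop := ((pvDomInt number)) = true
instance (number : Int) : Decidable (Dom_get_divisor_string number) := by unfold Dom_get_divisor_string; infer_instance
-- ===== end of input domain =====

-- B replaces A's trial division of every candidate up to half the number by a square-root-bounded
-- divisor-pair enumeration followed by a sort and a join (objective: faster).

-- ===== PORT A =====
-- while divisor <= number // 2: if number % divisor == 0: div_string += str(divisor) + " "; divisor += 1
def pvALoop (n : Int) (fuel : Nat) (divisor : Int) (acc : List Char) : List Char :=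
  match fuel with
  | 0 => acc
  | fuel + 1 =>
    if divisor ≤ PySem.Int.floordiv n 2 then
      pvALoop n fuel (divisor + 1)
        (if PySem.Int.mod n divisor == 0 then acc ++ (PySem.Int.toChars divisor ++ [' ']) else acc)
    else acc

-- the loop runs at most (number // 2).toNat times (divisor counts 1,2,…), so that fuel is enough
def get_divisor_string (number : Int) : String :=
  String.ofList (pvALoop number (PySem.Int.floordiv number 2).toNat 1 [] ++ PySem.Int.toChars number)

-- ===== PORT B =====
-- while i*i <= number: if number % i == 0: divs.append(i); if i != number//i: divs.append(number//i); i += 1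
-- (i is always a nonnegative integer in Source B, so it is carried as a Nat here; all arithmetic is on Int)
def pvBCollect (n : Int) (fuel : Nat) (i : Nat) (divs : List Int) : List Int :=
  match fuel with
  | 0 => divs
  | fuel + 1 =>
    if (i : Int) * (i : Int) ≤ n then
      pvBCollect n fuel (i + 1)
        (if PySem.Int.mod n (i : Int) == 0 then
          divs ++ [(i : Int)] ++
            (if (i : Int) ≠ PySem.Int.floordiv n (i : Int) then
              [PySem.Int.floordiv n (i : Int)] else [])
        else divs)
    else divs

-- the loop runs at most number.toNat times (i counts 1,2,… and i*i ≤ number forces i ≤ number)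
def get_divisor_string_alt (number : Int) : String :=
  let divs := pvBCollect number number.toNat 1 []
  let sortedDivs := PySem.List.sorted divs (fun x => x) false
  let parts := (sortedDivs.filter (fun d => d ≠ number)).map PySem.Int.toChars
  String.ofList (PySem.Chars.join [' '] (parts ++ [PySem.Int.toChars number]))

-- ===== PRECONDITION & SPEC =====
def Spec_get_divisor_string (number : Int) (out : String) : Prop := out = get_divisor_string_alt number
instance (number : Int) (out : String) : Decidable (Spec_get_divisor_string number out) := by unfold Spec_get_divisor_string; infer_instance

-- ===== CLAIM (what is proved, stated in full; the proofs are below) =====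
def Claim_equal_get_divisor_string : Prop := ∀ (number : Int), Dom_get_divisor_string number → Spec_get_divisor_string number (get_divisor_string number)

-- ===== LEMMAS AND PROOFS =====

-- the divisors of n that A's loop prints: 1 ≤ d ≤ n//2 in increasing order
def pvS (n : Int) : List Int :=
  (PySem.List.pyRange 1 (PySem.Int.floordiv n 2 + 1) 1).filter (fun d => PySem.Int.mod n d == 0)

-- all divisors of n in [1, n] in increasing order
def pvT (n : Int) : List Int :=
  (PySem.List.pyRange 1 (n + 1) 1).filter (fun d => PySem.Int.mod n d == 0)

-- what one iteration of B's loop appends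
def pvG (n : Int) (j : Nat) : List Int :=
  if PySem.Int.mod n (j : Int) == 0 then
    [(j : Int)] ++
      (if (j : Int) ≠ PySem.Int.floordiv n (j : Int) then [PySem.Int.floordiv n (j : Int)] else [])
  else []

-- everything B's loop collects, as a flatMap over the scanned range
def pvE (n : Int) : List Int := (List.range' 1 n.toNat.sqrt).flatMap (pvG n)


theorem pvALoop_eq (n : Int) : ∀ (fuel : Nat) (d : Int) (acc : List Char),
    (PySem.Int.floordiv n 2 + 1 - d).toNat ≤ fuel →
    pvALoop n fuel d acc = acc ++
      ((PySem.List.pyRange d (PySem.Int.floordiv n 2 + 1) 1).filter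
        (fun x => PySem.Int.mod n x == 0)).flatMap (fun x => PySem.Int.toChars x ++ [' ']) := by
  intro fuel
  induction fuel with
  | zero =>
    intro d acc h
    rw [PySem.List.pyRange_one_eq_nil (by omega)]
    simp [pvALoop]
  | succ fuel ih =>
    intro d acc h
    by_cases hc : d ≤ PySem.Int.floordiv n 2
    · rw [PySem.List.pyRange_one_cons (show d < PySem.Int.floordiv n 2 + 1 by omega)]
      simp only [pvALoop, if_pos hc]
      by_cases hm : (PySem.Int.mod n d == 0) = true
      · rw [if_pos hm, ih _ _ (by omega)]
        simp [hm, List.flatMap_cons, List.append_assoc]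
      · rw [if_neg hm, ih _ _ (by omega)]
        simp [hm]
    · simp only [pvALoop, if_neg hc]
      rw [PySem.List.pyRange_one_eq_nil (by omega)]
      simp

theorem pvBCollect_eq (n : Int) (hn : 0 ≤ n) : ∀ (fuel i : Nat) (divs : List Int),
    n.toNat.sqrt < i + fuel →
    pvBCollect n fuel i divs = divs ++ (List.range' i (n.toNat.sqrt + 1 - i)).flatMap (pvG n) := by
  have hbr : ∀ j : Nat, ((j : Int) * j ≤ n) ↔ j ≤ n.toNat.sqrt := by
    intro j
    rw [Nat.le_sqrt, Int.le_toNat hn]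
    push_cast
    exact Iff.rfl
  intro fuel
  induction fuel with
  | zero =>
    intro i divs h
    simp [pvBCollect, show n.toNat.sqrt + 1 - i = 0 by omega]
  | succ fuel ih =>
    intro i divs h
    by_cases hc : (i : Int) * (i : Int) ≤ n
    · have hir : i ≤ n.toNat.sqrt := (hbr i).1 hc
      have hg : (if (PySem.Int.mod n (i : Int) == 0) = true then
            divs ++ [(i : Int)] ++
              (if (i : Int) ≠ PySem.Int.floordiv n (i : Int) then
                [PySem.Int.floordiv n (i : Int)] else [])
          else divs) = divs ++ pvG n i := by
        unfold pvG
        by_cases hm : (PySem.Int.mod n (i : Int) == 0) = true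
        · simp [hm, List.append_assoc]
        · simp [hm]
      simp only [pvBCollect, if_pos hc]
      rw [ih (i + 1) _ (by omega), hg,
        show n.toNat.sqrt + 1 - i = (n.toNat.sqrt + 1 - (i + 1)) + 1 by omega,
        List.range'_succ, List.flatMap_cons]
      simp [List.append_assoc]
    · simp only [pvBCollect, if_neg hc]
      have h0 : n.toNat.sqrt + 1 - i = 0 := by
        have := (hbr i).2; omega
      simp [h0]

theorem mem_pvG {n : Int} {j : Nat} {a : Int} (h : a ∈ pvG n j) :
    (PySem.Int.mod n (j : Int) = 0) ∧
      (a = (j : Int) ∨ (a = PySem.Int.floordiv n (j : Int) ∧ a ≠ (j : Int))) := by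
  unfold pvG at h
  by_cases h1 : (PySem.Int.mod n (j : Int) == 0) = true
  · rw [if_pos h1] at h
    refine ⟨by simpa using h1, ?_⟩
    by_cases h2 : (j : Int) ≠ PySem.Int.floordiv n (j : Int)
    · rw [if_pos h2] at h
      simp only [List.cons_append, List.nil_append, List.mem_cons] at h
      rcases h with h | h | h
      · exact Or.inl h
      · exact Or.inr ⟨h, by rw [h]; exact fun hc => h2 hc.symm⟩
      · simp at h
    · rw [if_neg h2] at h
      simp at h
      exact Or.inl h
  · rw [if_neg h1] at h
    simp at h

-- the two divisors produced at step j: j*(n//j) = n and j ≤ n//j whenever j*j ≤ n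
theorem pvG_pair {n : Int} {j : Nat} (h1 : 0 < (j:Int)) (hsq : (j:Int) * j ≤ n)
    (hm : PySem.Int.mod n (j : Int) = 0) :
    (j : Int) * PySem.Int.floordiv n (j : Int) = n ∧ (j : Int) ≤ PySem.Int.floordiv n (j : Int) := by
  have hdvd : (j : Int) ∣ n := (PySem.Int.mod_eq_zero_iff_dvd n j).1 hm
  rw [PySem.Int.floordiv_eq_ediv_of_pos h1]
  have hmul : (j : Int) * (n / (j : Int)) = n := Int.mul_ediv_cancel' hdvd
  refine ⟨hmul, ?_⟩
  have : (j : Int) * (j : Int) ≤ (j : Int) * (n / (j : Int)) := by rw [hmul]; exact hsq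
  exact le_of_mul_le_mul_left this h1

theorem mem_range'_sqrt {n : Int} (hn : 0 ≤ n) {j : Nat} (hj : j ∈ List.range' 1 n.toNat.sqrt) :
    0 < (j : Int) ∧ (j : Int) * j ≤ n := by
  rw [List.mem_range'_1] at hj
  have hsq : j * j ≤ n.toNat := by
    have h1 : j ≤ n.toNat.sqrt := by omega
    have := Nat.le_sqrt.1 h1
    omega
  constructor
  · exact_mod_cast hj.1
  · have : ((j * j : Nat) : Int) ≤ ((n.toNat : Nat) : Int) := by exact_mod_cast hsq
    rw [Int.toNat_of_nonneg hn] at this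
    push_cast at this
    omega

theorem mem_pvE {n : Int} (hn : 1 ≤ n) (d : Int) :
    d ∈ pvE n ↔ 1 ≤ d ∧ d ≤ n ∧ d ∣ n := by
  unfold pvE
  rw [List.mem_flatMap]
  constructor
  · rintro ⟨j, hj, hm⟩
    obtain ⟨hj0, hjj⟩ := mem_range'_sqrt (by omega) hj
    obtain ⟨hmod, hcase⟩ := mem_pvG hm
    obtain ⟨hmul, hle⟩ := pvG_pair hj0 hjj hmod
    have hdvd : (j : Int) ∣ n := (PySem.Int.mod_eq_zero_iff_dvd n (j:Int)).1 hmod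
    have hjn : (j : Int) ≤ n := le_trans (by nlinarith) hjj
    rcases hcase with rfl | ⟨rfl, _⟩
    · exact ⟨by omega, hjn, hdvd⟩
    · refine ⟨by nlinarith, ?_, ?_⟩
      · rw [PySem.Int.floordiv_eq_ediv_of_pos hj0]
        exact Int.ediv_le_self _ (by omega)
      · exact ⟨(j : Int), by rw [mul_comm] at hmul; exact hmul.symm⟩
  · rintro ⟨h1, h2, h3⟩
    have hd0 : 0 < d := by omega
    have hde : d * (n / d) = n := Int.mul_ediv_cancel' h3
    have he1 : 1 ≤ n / d := by rw [Int.le_ediv_iff_mul_le hd0]; omega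
    have hrb : ∀ m : Int, 1 ≤ m → m * m ≤ n → m.toNat ∈ List.range' 1 n.toNat.sqrt := by
      intro m hm1 hmm
      rw [List.mem_range'_1]
      have hmt : (m.toNat : Int) = m := Int.toNat_of_nonneg (by omega)
      refine ⟨by omega, ?_⟩
      have : m.toNat * m.toNat ≤ n.toNat := by
        have : ((m.toNat * m.toNat : Nat) : Int) ≤ ((n.toNat : Nat) : Int) := by
          push_cast
          rw [hmt, Int.toNat_of_nonneg (by omega : (0:Int) ≤ n)]
          exact hmm
        exact_mod_cast this
      have := Nat.le_sqrt.2 this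
      omega
    by_cases hdd : d * d ≤ n
    · refine ⟨d.toNat, hrb d h1 hdd, ?_⟩
      have hmt : (d.toNat : Int) = d := Int.toNat_of_nonneg (by omega)
      unfold pvG
      rw [hmt, if_pos (by simpa using (PySem.Int.mod_eq_zero_iff_dvd n d).2 h3)]
      simp
    · set e : Int := n / d with hedef
      have hed : e < d := by nlinarith
      have hee : e * e ≤ n := by nlinarith
      have hedvd : e ∣ n := ⟨d, by rw [mul_comm]; exact hde.symm⟩
      refine ⟨e.toNat, hrb e he1 hee, ?_⟩
      have hmt : (e.toNat : Int) = e := Int.toNat_of_nonneg (by omega)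
      unfold pvG
      rw [hmt, if_pos (by simpa using (PySem.Int.mod_eq_zero_iff_dvd n e).2 hedvd)]
      have hfe : PySem.Int.floordiv n e = d := by
        rw [PySem.Int.floordiv_eq_ediv_of_pos (by omega)]
        have : n = e * d := by rw [mul_comm]; exact hde.symm
        rw [this, Int.mul_ediv_cancel_left d (by omega)]
      rw [if_pos (by rw [hfe]; omega)]
      simp [hfe]

theorem nodup_pvE {n : Int} (hn : 1 ≤ n) : (pvE n).Nodup := by
  unfold pvE
  rw [List.nodup_flatMap]
  constructor
  · intro j hj
    unfold pvG
    split_ifs with h1 h2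
    · simpa using h2
    · simp
    · simp
  · refine List.Pairwise.imp_of_mem ?_ (List.pairwise_lt_range' 1)
    intro j j' hj hj' hlt a haj haj'
    obtain ⟨hj0, hjj⟩ := mem_range'_sqrt (by omega : (0:Int) ≤ n) hj
    obtain ⟨hj0', hjj'⟩ := mem_range'_sqrt (by omega : (0:Int) ≤ n) hj'
    obtain ⟨hmod, hcase⟩ := mem_pvG haj
    obtain ⟨hmod', hcase'⟩ := mem_pvG haj'
    obtain ⟨hmul, hle⟩ := pvG_pair hj0 hjj hmod
    obtain ⟨hmul', hle'⟩ := pvG_pair hj0' hjj' hmod'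
    have hltI : (j : Int) < (j' : Int) := by exact_mod_cast hlt
    rcases hcase with rfl | ⟨rfl, hne⟩ <;> rcases hcase' with h' | ⟨h', hne'⟩
    · omega
    · linarith [hle', h' ▸ hltI]
    · have k1 : (j : Int) * (j' : Int) < (j' : Int) * (j' : Int) :=
        mul_lt_mul_of_pos_right hltI hj0'
      have k2 : (j' : Int) * (j' : Int) ≤ (j' : Int) * PySem.Int.floordiv n (j' : Int) :=
        mul_le_mul_of_nonneg_left hle' (le_of_lt hj0')
      rw [h'] at hmul
      linarith
    · have hfj0 : (0:Int) < PySem.Int.floordiv n (j : Int) := lt_of_lt_of_le hj0 hle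
      rw [← h'] at hmul'
      nlinarith [mul_pos (show (0:Int) < (j' : Int) - (j : Int) by omega) hfj0]

theorem mem_pvT {n : Int} (d : Int) : d ∈ pvT n ↔ 1 ≤ d ∧ d ≤ n ∧ d ∣ n := by
  unfold pvT
  simp [List.mem_filter, PySem.List.mem_pyRange_one, PySem.Int.mod_eq_zero_iff_dvd,
    and_assoc]

theorem pairwise_pvT (n : Int) : (pvT n).Pairwise (· < ·) :=
  List.Pairwise.filter _ (PySem.List.pairwise_lt_pyRange_one 1 (n + 1))

theorem sorted_pvE {n : Int} (hn : 1 ≤ n) :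
    PySem.List.sorted (pvE n) (fun x => x) false = pvT n := by
  refine PySem.List.sorted_eq_of_perm_of_pairwise_lt _ _ _ ?_ ?_
  · exact (List.perm_ext_iff_of_nodup
      ((pairwise_pvT n).imp ne_of_lt) (nodup_pvE hn)).2
      (fun a => (mem_pvT a).trans (mem_pvE hn a).symm)
  · exact pairwise_pvT n

theorem pvT_split {n : Int} (hn : 1 ≤ n) : pvT n = pvS n ++ [n] := by
  have h2 : (0:Int) < 2 := by omega
  have hfd0 : 0 ≤ PySem.Int.floordiv n 2 := by
    rw [PySem.Int.le_floordiv_iff_mul_le h2]; omega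
  have hfdn : PySem.Int.floordiv n 2 < n := by
    rw [PySem.Int.floordiv_lt_iff_lt_mul h2]; omega
  unfold pvT pvS
  rw [PySem.List.pyRange_one_append 1 (PySem.Int.floordiv n 2 + 1) (n + 1)
      (by omega) (by omega), List.filter_append,
    PySem.List.pyRange_one_succ_right (a := PySem.Int.floordiv n 2 + 1) (by omega),
    List.filter_append]
  have hnil : (PySem.List.pyRange (PySem.Int.floordiv n 2 + 1) n 1).filter
      (fun d => PySem.Int.mod n d == 0) = [] := by
    rw [List.filter_eq_nil_iff]
    intro d hd
    rw [PySem.List.mem_pyRange_one] at hd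
    obtain ⟨hdl, hdr⟩ := hd
    simp only [beq_iff_eq, PySem.Int.mod_eq_zero_iff_dvd]
    intro hdvd
    have hd0 : 0 < d := by omega
    have hde : d * (n / d) = n := Int.mul_ediv_cancel' hdvd
    have he1 : 1 ≤ n / d := by
      rw [Int.le_ediv_iff_mul_le hd0]
      linarith
    have hne1 : n / d ≠ 1 := by intro h; rw [h, mul_one] at hde; omega
    have h2e : 2 ≤ n / d := by omega
    have : d ≤ PySem.Int.floordiv n 2 := by
      rw [PySem.Int.le_floordiv_iff_mul_le h2]; nlinarith
    omega
  have hself : ([n] : List Int).filter (fun d => PySem.Int.mod n d == 0) = [n] := by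
    simp [PySem.Int.mod_eq_zero_iff_dvd]
  rw [hnil, hself, List.nil_append]

theorem pvS_lt {n : Int} (hn : 1 ≤ n) {d : Int} (hd : d ∈ pvS n) : d < n := by
  have h2 : (0:Int) < 2 := by omega
  unfold pvS at hd
  rw [List.mem_filter, PySem.List.mem_pyRange_one] at hd
  have : PySem.Int.floordiv n 2 < n := by
    rw [PySem.Int.floordiv_lt_iff_lt_mul h2]; omega
  omega

theorem pvT_filter {n : Int} (hn : 1 ≤ n) :
    (pvT n).filter (fun d => d ≠ n) = pvS n := by
  rw [pvT_split hn, List.filter_append]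
  have h1 : (pvS n).filter (fun d => d ≠ n) = pvS n := by
    rw [List.filter_eq_self]
    intro d hd
    simpa using ne_of_lt (pvS_lt hn hd)
  have h2 : ([n] : List Int).filter (fun d => d ≠ n) = [] := by simp
  rw [h1, h2, List.append_nil]

theorem join_space (xs : List (List Char)) (last : List Char) :
    PySem.Chars.join [' '] (xs ++ [last]) = xs.flatMap (fun p => p ++ [' ']) ++ last := by
  induction xs with
  | nil => simp [PySem.Chars.join_singleton]
  | cons a t ih =>
    cases t with
    | nil =>
      simp only [List.cons_append, List.nil_append]
      rw [PySem.Chars.join_cons_cons, PySem.Chars.join_singleton]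
      simp [List.append_assoc]
    | cons b t' =>
      simp only [List.cons_append] at ih ⊢
      rw [PySem.Chars.join_cons_cons, ih]
      simp [List.flatMap_cons, List.append_assoc]

-- ===== VERDICT (by name: the statement is the Claim_ definition above) =====
theorem get_divisor_string_spec : Claim_equal_get_divisor_string := by
  intro number _
  unfold Spec_get_divisor_string get_divisor_string get_divisor_string_alt
  by_cases hn : 1 ≤ number
  · have hB : pvBCollect number number.toNat 1 [] = pvE number := by
      rw [pvBCollect_eq number (by omega) number.toNat 1 []
        (by have := Nat.sqrt_le_self number.toNat; omega)]
      simp [pvE]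
    simp only [hB, sorted_pvE hn, pvT_filter hn]
    rw [join_space, pvALoop_eq number _ 1 [] (by omega), List.flatMap_map, List.nil_append]
    rfl
  · have hfd : (PySem.Int.floordiv number 2).toNat = 0 := by
      have : PySem.Int.floordiv number 2 < 1 := by
        rw [PySem.Int.floordiv_lt_iff_lt_mul (by omega : (0:Int) < 2)]
        omega
      omega
    have hnt : number.toNat = 0 := by omega
    rw [hfd, hnt]
    have hA : pvALoop number 0 1 [] = [] := rfl
    have hB : pvBCollect number 0 1 [] = [] := rfl
    simp only [hA, hB, List.nil_append]
    have hs : PySem.List.sorted ([] : List Int) (fun x => x) false = [] :=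
      (PySem.List.sorted_eq_nil_iff _ _ _).2 rfl
    simp only [hs, List.filter_nil, List.map_nil, List.nil_append,
      PySem.Chars.join_singleton]
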